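-- pv_equiv track=rewrite | github.com/layup/compound_reports | Post_Generate/cannabisReport.py | calculateSections
-- ===== SOURCE A (Python) =====
-- def calculateSections(samples, totalSamples, unitType):
--     sectionJobs = [];
--
--     if(unitType in [0,1,2]):
--         headerLimit = 2
--     else:
--         headerLimit = 4
--
--     if(totalSamples <= headerLimit):
--         sectionJobs.append(samples)
--     else:
--         tempSection = []
--         for i, sample in enumerate(samples, start=1):
--
--             tempSection.append(sample)
--             if(i % headerLimit == 0):
--                 sectionJobs.append(tempSection)
--                 tempSection = []
--
--         if(len(tempSection) != 0):
--             sectionJobs.append(tempSection);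
--
--     return sectionJobs
-- ===== SOURCE B (Python) =====
-- def calculateSections(samples, totalSamples, unitType):
--     headerLimit = 2 if unitType in (0, 1, 2) else 4
--     if totalSamples <= headerLimit:
--         return [samples]
--     sections = []
--     i = 0
--     while i < len(samples):
--         sections.append(samples[i:i + headerLimit])
--         i += headerLimit
--     return sections
-- ===== Notes on version B (the rewrite author's own statement) =====
-- stated objective: simpler
-- what changed: Replaces the enumerate loop with a 1-based counter, modulo test and running tempSection buffer by direct stride slicing (sections.append(samples[i:i+headerLimit]); i += headerLimit), keeping the headerLimit computation and the totalSamples <= headerLimit special case.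
import Mathlib
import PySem

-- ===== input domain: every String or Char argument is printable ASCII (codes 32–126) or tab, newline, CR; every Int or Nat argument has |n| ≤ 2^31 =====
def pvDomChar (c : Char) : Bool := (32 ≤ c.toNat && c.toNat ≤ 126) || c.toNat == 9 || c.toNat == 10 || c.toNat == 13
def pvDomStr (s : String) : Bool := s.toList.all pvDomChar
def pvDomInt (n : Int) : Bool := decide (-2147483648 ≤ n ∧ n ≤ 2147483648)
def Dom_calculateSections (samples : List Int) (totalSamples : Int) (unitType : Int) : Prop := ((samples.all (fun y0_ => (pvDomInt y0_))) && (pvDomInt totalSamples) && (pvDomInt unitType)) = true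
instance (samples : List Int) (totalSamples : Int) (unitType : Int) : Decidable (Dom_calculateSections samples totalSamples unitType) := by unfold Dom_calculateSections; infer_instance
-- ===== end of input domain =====

-- B replaces A's enumerate/modulo buffer-flush loop by direct take/drop chunking; return values proved equal everywhere.

-- ===== PORT A =====
-- A: header limit, then special case, else enumerate(samples, start=1) with a
-- tempSection buffer flushed whenever i % headerLimit == 0, plus a final flush.
def loopA (k : Int) : List Int → Int → List Int → List (List Int) → List (List Int)
  | [], _, temp, acc => if temp.length ≠ 0 then acc ++ [temp] else acc
  | x :: xs, i, temp, acc =>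
    let temp' := temp ++ [x]
    if PySem.Int.mod i k = 0 then loopA k xs (i + 1) [] (acc ++ [temp'])
    else loopA k xs (i + 1) temp' acc

def calculateSections (samples : List Int) (totalSamples : Int) (unitType : Int) : List (List Int) :=
  let headerLimit : Int := if unitType = 0 ∨ unitType = 1 ∨ unitType = 2 then 2 else 4
  if totalSamples ≤ headerLimit then [samples]
  else loopA headerLimit samples 1 [] []

-- ===== PORT B =====
-- B: while i < len(samples): sections.append(samples[i:i+k]); i += k   (stride slicing).
-- 'i += k' (k ∈ {2,4}) is written 'i + (k - 1) + 1' only so Lean sees the index grow.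
def chunkIdx (k : Nat) (samples : List Int) (i : Nat) : List (List Int) :=
  if h : i < samples.length then
    PySem.List.slice samples (some (i : Int)) (some ((i : Int) + (k : Int)))
      :: chunkIdx k samples (i + (k - 1) + 1)
  else []
termination_by samples.length - i
decreasing_by omega

def calculateSections_alt (samples : List Int) (totalSamples : Int) (unitType : Int) : List (List Int) :=
  let headerLimit : Int := if unitType = 0 ∨ unitType = 1 ∨ unitType = 2 then 2 else 4
  if totalSamples ≤ headerLimit then [samples]
  else chunkIdx headerLimit.toNat samples 0

-- ===== PRECONDITION & SPEC =====
def Spec_calculateSections (samples : List Int) (totalSamples : Int) (unitType : Int) (out : List (List Int)) : Prop := out = calculateSections_alt samples totalSamples unitType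
instance (samples : List Int) (totalSamples : Int) (unitType : Int) (out : List (List Int)) : Decidable (Spec_calculateSections samples totalSamples unitType out) := by unfold Spec_calculateSections; infer_instance

-- ===== CLAIM (what is proved, stated in full; the proofs are below) =====
def Claim_equal_calculateSections : Prop := ∀ (samples : List Int) (totalSamples : Int) (unitType : Int), Dom_calculateSections samples totalSamples unitType → Spec_calculateSections samples totalSamples unitType (calculateSections samples totalSamples unitType)

-- ===== LEMMAS AND PROOFS =====

-- proof-side normal form: take/drop chunking
def chunkB (k : Nat) : List Int → List (List Int)
  | [] => []
  | y :: t => (y :: t.take (k - 1)) :: chunkB k (t.drop (k - 1))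
termination_by l => l.length
decreasing_by simp

theorem chunkB_nil (k : Nat) : chunkB k [] = [] := by rw [chunkB]

theorem chunkB_cons_def (k : Nat) (y : Int) (t : List Int) :
    chunkB k (y :: t) = (y :: t.take (k - 1)) :: chunkB k (t.drop (k - 1)) := by rw [chunkB]

theorem chunkB_cons (k : Nat) (y : Int) (t : List Int) (hk : 1 ≤ k) :
    chunkB k (y :: t) = (y :: t).take k :: chunkB k ((y :: t).drop k) := by
  cases k with
  | zero => omega
  | succ n => simp [chunkB_cons_def]

theorem chunkB_append_full (k : Nat) (l xs : List Int) (hl : l.length = k) (hk : 1 ≤ k) :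
    chunkB k (l ++ xs) = l :: chunkB k xs := by
  cases l with
  | nil => simp at hl; omega
  | cons y t =>
    rw [List.cons_append, chunkB_cons k y (t ++ xs) hk]
    congr 1
    · rw [← List.cons_append, List.take_left' hl]
    · rw [← List.cons_append, List.drop_left' hl]

theorem loopA_eq_chunkB (k : Nat) (hk : 1 ≤ k) :
    ∀ (xs temp : List Int) (m : Nat) (acc : List (List Int)),
      temp.length < k →
      loopA (k : Int) xs ((temp.length : Int) + 1 + (k : Int) * (m : Int)) temp acc
        = acc ++ chunkB k (temp ++ xs) := by
  intro xs
  induction xs with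
  | nil =>
    intro temp m acc hlen
    cases temp with
    | nil => simp [loopA, chunkB_nil]
    | cons y t =>
      simp only [loopA, List.append_nil]
      have ht : t.take (k - 1) = t := List.take_of_length_le (by simp at hlen; omega)
      have hd : t.drop (k - 1) = [] := List.drop_eq_nil_of_le (by simp at hlen; omega)
      simp [chunkB_cons_def, chunkB_nil, ht, hd]
  | cons x xs ih =>
    intro temp m acc hlen
    have hmodpos : (0 : Int) < (k : Int) := by exact_mod_cast hk
    have hmod : PySem.Int.mod ((temp.length : Int) + 1 + (k : Int) * (m : Int)) (k : Int)
        = ((temp.length : Int) + 1) % (k : Int) := by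
      rw [PySem.Int.mod_eq_emod_of_pos hmodpos, Int.add_mul_emod_self_left]
    by_cases hfull : temp.length + 1 = k
    · have hz : PySem.Int.mod ((temp.length : Int) + 1 + (k : Int) * (m : Int)) (k : Int) = 0 := by
        rw [hmod]
        have : ((temp.length : Int) + 1) = (k : Int) := by exact_mod_cast hfull
        simp [this]
      simp only [loopA, hz]
      have harg : (temp.length : Int) + 1 + (k : Int) * (m : Int) + 1
          = ((0 : Nat) : Int) + 1 + (k : Int) * ((m + 1 : Nat) : Int) := by
        have : ((temp.length : Int) + 1) = (k : Int) := by exact_mod_cast hfull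
        push_cast
        linarith [this]
      have h0 : ([] : List Int).length = 0 := rfl
      rw [show ((temp.length : Int) + 1 + (k : Int) * (m : Int) + 1)
            = ((([] : List Int).length : Int) + 1 + (k : Int) * ((m + 1 : Nat) : Int)) by
          simpa using harg]
      rw [ih [] (m + 1) (acc ++ [temp ++ [x]]) hk]
      have hfl : (temp ++ [x]).length = k := by simp; omega
      rw [show temp ++ x :: xs = (temp ++ [x]) ++ xs by simp]
      rw [chunkB_append_full k (temp ++ [x]) xs hfl hk]
      simp
    · have hnz : PySem.Int.mod ((temp.length : Int) + 1 + (k : Int) * (m : Int)) (k : Int) ≠ 0 := by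
        rw [hmod]
        rw [Int.emod_eq_of_lt (by positivity) (by exact_mod_cast (by omega : temp.length + 1 < k))]
        omega
      simp only [loopA, if_neg hnz]
      have harg : (temp.length : Int) + 1 + (k : Int) * (m : Int) + 1
          = (((temp ++ [x]).length : Int)) + 1 + (k : Int) * (m : Int) := by
        simp only [List.length_append, List.length_cons, List.length_nil]
        push_cast; ring
      rw [harg, ih (temp ++ [x]) m acc (by simp; omega)]
      rw [show temp ++ x :: xs = (temp ++ [x]) ++ xs by simp]

-- ===== VERDICT (by name: the statement is the Claim_ definition above) =====
theorem chunkIdx_eq_chunkB (k : Nat) (hk : 1 ≤ k) (samples : List Int) :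
    ∀ (fuel i : Nat), samples.length - i ≤ fuel →
      chunkIdx k samples i = chunkB k (samples.drop i) := by
  intro fuel
  induction fuel with
  | zero =>
    intro i hi
    rw [chunkIdx]
    rw [dif_neg (by omega)]
    rw [List.drop_eq_nil_of_le (by omega), chunkB_nil]
  | succ fuel ih =>
    intro i hi
    rw [chunkIdx]
    by_cases h : i < samples.length
    · rw [dif_pos h]
      have hslice : PySem.List.slice samples (some (i : Int)) (some ((i : Int) + (k : Int)))
          = (samples.drop i).take k := PySem.List.slice_natCast_add samples i k
      obtain ⟨y, t, hyt⟩ : ∃ y t, samples.drop i = y :: t := by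
        cases hd : samples.drop i with
        | nil => exact absurd (List.drop_eq_nil_iff.mp hd) (by omega)
        | cons y t => exact ⟨y, t, rfl⟩
      rw [hslice, ih (i + (k - 1) + 1) (by omega), hyt, chunkB_cons k y t hk]
      have : i + (k - 1) + 1 = i + k := by omega
      rw [this, ← List.drop_drop]
      rw [hyt]
    · rw [dif_neg h]
      rw [List.drop_eq_nil_of_le (by omega), chunkB_nil]

theorem calculateSections_spec : Claim_equal_calculateSections := by
  intro samples totalSamples unitType _
  unfold Spec_calculateSections calculateSections calculateSections_alt
  by_cases hu : unitType = 0 ∨ unitType = 1 ∨ unitType = 2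
  · rw [if_pos hu]
    show (if totalSamples ≤ (2:Int) then [samples] else loopA 2 samples 1 [] [])
        = (if totalSamples ≤ (2:Int) then [samples] else chunkIdx (Int.toNat 2) samples 0)
    split
    · rfl
    · rw [show Int.toNat 2 = 2 from rfl,
          chunkIdx_eq_chunkB 2 (by omega) samples samples.length 0 (by omega), List.drop_zero]
      simpa using loopA_eq_chunkB 2 (by omega) samples [] 0 [] (by simp)
  · rw [if_neg hu]
    show (if totalSamples ≤ (4:Int) then [samples] else loopA 4 samples 1 [] [])
        = (if totalSamples ≤ (4:Int) then [samples] else chunkIdx (Int.toNat 4) samples 0)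
    split
    · rfl
    · rw [show Int.toNat 4 = 4 from rfl,
          chunkIdx_eq_chunkB 4 (by omega) samples samples.length 0 (by omega), List.drop_zero]
      simpa using loopA_eq_chunkB 4 (by omega) samples [] 0 [] (by simp)
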